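-- pv_equiv track=rewrite | github.com/aaronlee86/reel | script2scene.py | group_rows_by_mode
-- ===== SOURCE A (Python) =====
-- from typing import Dict, List, Any, Optional, Tuple
--
-- def group_rows_by_mode(rows: List[Dict[str, str]]) -> List[Tuple[str, List[Dict[str, str]]]]:
--     """Group consecutive rows by mode"""
--     if not rows:
--         return []
--
--     groups = []
--     current_mode = None
--     current_group = []
--
--     for row in rows:
--         mode = row.get('mode', '').strip()
--
--         # Rule 1: If mode is specified, start a new scene
--         if mode:
--             # Save the previous group if it exists
--             if current_group:
--                 groups.append((current_mode, current_group))
--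
--             # Start new group with this row
--             current_mode = mode
--             current_group = [row]
--
--         # Rule 2: If no mode specified, inherit and group with previous
--         else:
--             # Skip if we don't have a current mode to inherit from
--             if current_mode is None:
--                 continue
--
--             # Inherit the mode and add to current group
--             row['mode'] = current_mode
--             current_group.append(row)
--
--     # Add the final group
--     if current_group:
--         groups.append((current_mode, current_group))
--
--     return groups
-- ===== SOURCE B (Python) =====
-- from typing import Dict, List, Any, Optional, Tuple
--
-- def group_rows_by_mode(rows: List[Dict[str, str]]) -> List[Tuple[str, List[Dict[str, str]]]]:
--     """Group consecutive rows by mode: split into spans at rows with an explicit mode."""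
--     n = len(rows)
--     i = 0
--     # leading rows with no explicit mode have nothing to inherit from: skip them
--     while i < n and not rows[i].get('mode', '').strip():
--         i += 1
--     groups = []
--     while i < n:
--         mode = rows[i].get('mode', '').strip()
--         group = [rows[i]]
--         i += 1
--         # span of following rows without explicit mode: they inherit this mode
--         while i < n and not rows[i].get('mode', '').strip():
--             rows[i]['mode'] = mode
--             group.append(rows[i])
--             i += 1
--         groups.append((mode, group))
--     return groups
-- ===== Notes on version B (the rewrite author's own statement) =====
-- stated objective: alternative
-- what changed: A runs one fold carrying (groups, current_mode, current_group) accumulator state with deferred flushes; B instead splits the list into spans: skip the leading inherit-only rows, then repeatedly take a boundary row and the span of following mode-less rows as one group.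
import Mathlib
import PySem

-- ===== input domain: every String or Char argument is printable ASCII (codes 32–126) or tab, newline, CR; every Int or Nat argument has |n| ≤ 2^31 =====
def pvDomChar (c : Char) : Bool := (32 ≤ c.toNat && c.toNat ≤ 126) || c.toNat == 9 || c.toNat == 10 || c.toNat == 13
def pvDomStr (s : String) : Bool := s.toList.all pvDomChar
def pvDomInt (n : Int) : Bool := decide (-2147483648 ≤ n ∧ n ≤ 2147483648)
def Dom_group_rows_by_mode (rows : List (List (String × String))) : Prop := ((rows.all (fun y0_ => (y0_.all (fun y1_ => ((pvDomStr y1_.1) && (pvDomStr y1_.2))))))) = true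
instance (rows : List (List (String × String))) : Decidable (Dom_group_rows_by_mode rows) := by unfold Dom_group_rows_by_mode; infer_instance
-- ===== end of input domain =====

-- B groups by spans between explicit-mode boundary rows instead of A's single fold with
-- accumulator state (alternative decomposition, same cost).  Both Pythons mutate inherited
-- rows' 'mode' in place identically; the theorems below are about the RETURN value.

-- row.get('mode', '').strip()  (shared transliteration of this Python expression)
def rowMode (row : List (String × String)) : String :=
  PySem.Str.strip (PySem.Dict.getD (PySem.Dict.mk row) "mode" "")

-- row['mode'] = m  (shared transliteration of this Python statement)
def rowSetMode (row : List (String × String)) (m : String) : List (String × String) :=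
  ((PySem.Dict.mk row).insert "mode" m).items

-- ===== PORT A =====
-- A's loop state: (groups, current_mode, current_group)
def stepA (st : List (String × List (List (String × String))) × Option String × List (List (String × String)))
    (row : List (String × String)) :
    List (String × List (List (String × String))) × Option String × List (List (String × String)) :=
  let mode := rowMode row
  if mode ≠ "" then
    ((if st.2.2 ≠ [] then st.1 ++ [(st.2.1.getD "", st.2.2)] else st.1), some mode, [row])
  else
    match st.2.1 with
    | none => st
    | some m => (st.1, some m, st.2.2 ++ [rowSetMode row m])

def finalizeA (st : List (String × List (List (String × String))) × Option String × List (List (String × String))) :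
    List (String × List (List (String × String))) :=
  if st.2.2 ≠ [] then st.1 ++ [(st.2.1.getD "", st.2.2)] else st.1

def group_rows_by_mode (rows : List (List (String × String))) : List (String × (List (List (String × String)))) :=
  if rows = [] then []
  else finalizeA (rows.foldl stepA ([], none, []))

-- ===== PORT B =====
-- skip leading rows with no explicit mode
def dropLead : List (List (String × String)) → List (List (String × String))
  | [] => []
  | r :: rs => if rowMode r = "" then dropLead rs else r :: rs

-- the span of mode-less rows inheriting m (each mutated), and the remaining rows
def spanInherit (m : String) : List (List (String × String)) →
    List (List (String × String)) × List (List (String × String))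
  | [] => ([], [])
  | r :: rs =>
    if rowMode r = "" then
      let p := spanInherit m rs
      (rowSetMode r m :: p.1, p.2)
    else ([], r :: rs)

theorem spanInherit_snd_length_le (m : String) (l : List (List (String × String))) :
    (spanInherit m l).2.length ≤ l.length := by
  induction l with
  | nil => simp [spanInherit]
  | cons r rs ih =>
    simp only [spanInherit]
    split
    · simpa using Nat.le_succ_of_le ih
    · simp

def buildGroups : List (List (String × String)) → List (String × (List (List (String × String))))
  | [] => []
  | r :: rs =>
    let m := rowMode r
    let p := spanInherit m rs
    (m, r :: p.1) :: buildGroups p.2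
termination_by l => l.length
decreasing_by
  exact Nat.lt_succ_of_le (spanInherit_snd_length_le (rowMode r) rs)

def group_rows_by_mode_alt (rows : List (List (String × String))) : List (String × (List (List (String × String)))) :=
  buildGroups (dropLead rows)

-- ===== PRECONDITION & SPEC =====
def Spec_group_rows_by_mode (rows : List (List (String × String))) (out : List (String × (List (List (String × String))))) : Prop := out = group_rows_by_mode_alt rows
instance (rows : List (List (String × String))) (out : List (String × (List (List (String × String))))) : Decidable (Spec_group_rows_by_mode rows out) := by unfold Spec_group_rows_by_mode; infer_instance

-- ===== CLAIM (what is proved, stated in full; the proofs are below) =====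
def Claim_equal_group_rows_by_mode : Prop := ∀ (rows : List (List (String × String))), Dom_group_rows_by_mode rows → Spec_group_rows_by_mode rows (group_rows_by_mode rows)

-- ===== LEMMAS AND PROOFS =====

theorem buildGroups_nil : buildGroups [] = [] := by rw [buildGroups]

theorem buildGroups_cons (r : List (String × String)) (rs : List (List (String × String))) :
    buildGroups (r :: rs)
      = (rowMode r, r :: (spanInherit (rowMode r) rs).1) :: buildGroups (spanInherit (rowMode r) rs).2 := by
  rw [buildGroups]

-- A's fold from a live state (current_mode = m, nonempty current_group) produces the pending
-- group extended by the inherited span, then the groups of the remainder.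
theorem foldA_live (rest : List (List (String × String)))
    (gs : List (String × List (List (String × String))))
    (m : String) (cg : List (List (String × String))) (hcg : cg ≠ []) :
    finalizeA (rest.foldl stepA (gs, some m, cg))
      = gs ++ (m, cg ++ (spanInherit m rest).1) :: buildGroups (spanInherit m rest).2 := by
  induction rest generalizing gs m cg with
  | nil => simp [finalizeA, spanInherit, hcg, buildGroups_nil]
  | cons r rs ih =>
    by_cases h : rowMode r = ""
    · have hstep : stepA (gs, some m, cg) r = (gs, some m, cg ++ [rowSetMode r m]) := by
        simp [stepA, h]
      simp only [List.foldl_cons, hstep, spanInherit, h, if_pos]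
      rw [ih gs m (cg ++ [rowSetMode r m]) (by simp)]
      simp
    · have hstep : stepA (gs, some m, cg) r
          = (gs ++ [(m, cg)], some (rowMode r), [r]) := by
        simp [stepA, h, hcg]
      rw [List.foldl_cons, hstep, ih (gs ++ [(m, cg)]) (rowMode r) [r] (by simp)]
      simp [spanInherit, h, buildGroups_cons]

-- A's fold from the initial state equals B's span decomposition after skipping leading rows.
theorem foldA_init (rows : List (List (String × String))) :
    finalizeA (rows.foldl stepA ([], none, [])) = buildGroups (dropLead rows) := by
  induction rows with
  | nil => simp [finalizeA, dropLead, buildGroups_nil]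
  | cons r rs ih =>
    by_cases h : rowMode r = ""
    · have hstep : stepA ([], none, []) r = ([], none, []) := by simp [stepA, h]
      simp only [List.foldl_cons, hstep, dropLead, h, if_pos, ih]
    · have hstep : stepA ([], none, []) r = ([], some (rowMode r), [r]) := by
        simp [stepA, h]
      rw [List.foldl_cons, hstep, foldA_live rs [] (rowMode r) [r] (by simp)]
      simp [dropLead, h, buildGroups_cons]

-- ===== VERDICT (by name: the statement is the Claim_ definition above) =====
theorem group_rows_by_mode_spec : Claim_equal_group_rows_by_mode := by
  intro rows _
  unfold Spec_group_rows_by_mode group_rows_by_mode group_rows_by_mode_alt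
  by_cases h : rows = []
  · subst h; simp [dropLead, buildGroups_nil]
  · simp only [h, if_false]
    exact foldA_init rows
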